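-- pv_equiv track=rewrite | github.com/honey-lee/Algorithm---Programmers | Python - Level1/이상한 문자 만들기/이상한 문자 만들기.py | solution
-- ===== SOURCE A (Python) =====
-- def solution(s):
--     answer = []
--     s = s.split()
--     for word in s:
--         l = len(word)
--         new_word = ''
--         for i in range(l):
--             if i % 2:
--                 new_word = new_word + word[i].lower()
--             else:
--                 new_word = new_word + word[i].upper()
--
--         answer.append(new_word)
--
--
--     return ''.join(answer)
-- ===== SOURCE B (Python) =====
-- def solution(s):
--     # single flat scan: a position counter that resets on whitespace
--     out = []
--     k = 0
--     for c in s: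
--         if c.isspace():
--             k = 0
--         else:
--             out.append(c.upper() if k % 2 == 0 else c.lower())
--             k += 1
--     return ''.join(out)
-- ===== Notes on version B (the rewrite author's own statement) =====
-- stated objective: alternative
-- what changed: Replaces A's split-into-words plus nested index loop (with quadratic string concatenation per word) by one flat scan over the original string with a whitespace-resettable position counter.
import Mathlib
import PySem

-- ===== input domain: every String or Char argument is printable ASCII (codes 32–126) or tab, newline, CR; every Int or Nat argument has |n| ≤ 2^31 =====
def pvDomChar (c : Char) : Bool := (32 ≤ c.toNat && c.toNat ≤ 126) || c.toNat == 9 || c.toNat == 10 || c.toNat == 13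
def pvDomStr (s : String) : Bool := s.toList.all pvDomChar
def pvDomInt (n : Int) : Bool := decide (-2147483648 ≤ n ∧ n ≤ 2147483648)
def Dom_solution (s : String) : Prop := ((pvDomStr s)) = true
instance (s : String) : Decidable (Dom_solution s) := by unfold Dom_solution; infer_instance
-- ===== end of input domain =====

-- B replaces A's split-into-words + per-word index loop by one flat scan with a whitespace-resettable counter (alternative decomposition; return value only, no mutation).

-- ===== PORT A =====
-- inner loop of A: for i in range(len(word)): new_word += word[i].lower()/upper()
def solutionWord (word : String) : String :=
  (PySem.List.pyRange 0 (PySem.Str.len word) 1).foldl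
    (fun new_word i =>
      match PySem.Str.pyGet? word i with
      | some c =>
          if PySem.Int.mod i 2 ≠ 0 then new_word.push (PySem.Chars.lowerChar c)
          else new_word.push (PySem.Chars.upperChar c)
      | none => new_word)   -- unreachable: i ∈ range(len(word))
    ""

def solution (s : String) : String :=
  let words := PySem.Str.split₀ s
  let answer := words.foldl (fun answer word => answer ++ [solutionWord word]) []
  PySem.Str.join "" answer

-- ===== PORT B =====
-- one step of B's flat scan: state = (position counter, output chars)
def altStep (st : Nat × List Char) (c : Char) : Nat × List Char :=
  if PySem.Chars.isspace c then (0, st.2)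
  else (st.1 + 1, st.2 ++ [if st.1 % 2 == 0 then PySem.Chars.upperChar c else PySem.Chars.lowerChar c])

def solution_alt (s : String) : String :=
  String.ofList (s.toList.foldl altStep (0, [])).2

-- ===== PRECONDITION & SPEC =====
def Spec_solution (s : String) (out : String) : Prop := out = solution_alt s
instance (s : String) (out : String) : Decidable (Spec_solution s out) := by unfold Spec_solution; infer_instance

-- ===== CLAIM (what is proved, stated in full; the proofs are below) =====
def Claim_equal_solution : Prop := ∀ (s : String), Dom_solution s → Spec_solution s (solution s)

-- ===== LEMMAS AND PROOFS =====

-- case-toggled word starting at position k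
def wt : Nat → List Char → List Char
  | _, [] => []
  | k, c :: cs =>
      (if k % 2 == 0 then PySem.Chars.upperChar c else PySem.Chars.lowerChar c) :: wt (k+1) cs

-- B's scan, recursively
def scanB : Nat → List Char → List Char
  | _, [] => []
  | k, c :: cs =>
      if PySem.Chars.isspace c then scanB 0 cs
      else (if k % 2 == 0 then PySem.Chars.upperChar c else PySem.Chars.lowerChar c) :: scanB (k+1) cs

theorem wt_append (k : Nat) (xs ys : List Char) :
    wt k (xs ++ ys) = wt k xs ++ wt (k + xs.length) ys := by
  induction xs generalizing k with
  | nil => simp [wt]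
  | cons x xs ih => simp [wt, ih, Nat.add_assoc, Nat.add_comm 1 xs.length]

theorem solutionWord_toList (pre cs : List Char) (acc : String) :
    ((PySem.List.pyRange (pre.length : Int) ((pre.length + cs.length : Nat) : Int) 1).foldl
      (fun new_word i =>
        match PySem.Str.pyGet? (String.ofList (pre ++ cs)) i with
        | some c =>
            if PySem.Int.mod i 2 ≠ 0 then new_word.push (PySem.Chars.lowerChar c)
            else new_word.push (PySem.Chars.upperChar c)
        | none => new_word) acc).toList
    = acc.toList ++ wt pre.length cs := by
  induction cs generalizing pre acc with
  | nil => simp [wt]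
  | cons c cs ih =>
    rw [PySem.List.pyRange_one_cons (by simp)]
    simp only [List.foldl_cons]
    have hget : PySem.Str.pyGet? (String.ofList (pre ++ c :: cs)) (pre.length : Int) = some c := by
      have := PySem.List.pyGet?_append_length pre cs c
      simp
    rw [hget]
    have hmod : PySem.Int.mod (pre.length : Int) 2 = ((pre.length % 2 : Nat) : Int) := by
      rw [PySem.Int.mod, Int.fmod_eq_emod, if_pos (Or.inl (by norm_num)), add_zero]
      push_cast
      ring
    have key := ih (pre ++ [c])
    simp only [List.append_assoc, List.cons_append, List.nil_append, List.length_append,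
      List.length_cons, List.length_nil] at key ⊢
    rcases Nat.even_or_odd pre.length with hp | hp
    · have h2 : pre.length % 2 = 0 := Nat.even_iff.mp hp
      rw [if_neg (by rw [hmod, h2]; simp)]
      rw [show ((pre.length : Int) + 1) = ((pre.length + 1 : Nat) : Int) by push_cast; ring,
          show ((pre.length + (cs.length + 1) : Nat) : Int) = ((pre.length + 1 + cs.length : Nat) : Int) by push_cast; ring]
      rw [key (acc.push (PySem.Chars.upperChar c))]
      simp [wt, h2]
    · have h2 : pre.length % 2 = 1 := Nat.odd_iff.mp hp
      rw [if_pos (by rw [hmod, h2]; simp)]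
      rw [show ((pre.length : Int) + 1) = ((pre.length + 1 : Nat) : Int) by push_cast; ring,
          show ((pre.length + (cs.length + 1) : Nat) : Int) = ((pre.length + 1 + cs.length : Nat) : Int) by push_cast; ring]
      rw [key (acc.push (PySem.Chars.lowerChar c))]
      simp [wt, h2]

theorem solutionWord_eq (l : List Char) :
    (solutionWord (String.ofList l)).toList = wt 0 l := by
  have := solutionWord_toList [] l ""
  simpa [solutionWord, PySem.Str.len_eq] using this

theorem foldl_append_singleton {α β : Type} (f : α → β) :
    ∀ (l : List α) (acc : List β),
      l.foldl (fun a w => a ++ [f w]) acc = acc ++ l.map f := by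
  intro l
  induction l with
  | nil => simp
  | cons x xs ih => intro acc; simp [ih]

theorem join_nil_flatten : ∀ (parts : List (List Char)),
    PySem.Chars.join [] parts = parts.flatten := by
  intro parts
  induction parts with
  | nil => simp [PySem.Chars.join_nil]
  | cons p rest ih =>
    cases rest with
    | nil => simp [PySem.Chars.join_singleton]
    | cons q r => rw [PySem.Chars.join_cons_cons]; simp_all

theorem go_flatten (cs : List Char) : ∀ (cur : List Char) (acc : List (List Char)),
    ((PySem.Chars.split₀.go cs cur acc).map (wt 0)).flatten
      = ((acc.reverse).map (wt 0)).flatten ++ wt 0 cur.reverse ++ scanB cur.length cs := by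
  induction cs with
  | nil =>
    intro cur acc
    by_cases h : cur = []
    · simp [PySem.Chars.split₀.go, h, wt, scanB]
    · simp [PySem.Chars.split₀.go, List.isEmpty_iff, h, scanB]
  | cons c rest ih =>
    intro cur acc
    by_cases hs : PySem.Chars.isspace c = true
    · by_cases h : cur = []
      · simp [PySem.Chars.split₀.go, hs, h, ih, wt, scanB]
      · simp only [PySem.Chars.split₀.go, hs, if_pos, List.isEmpty_iff, h, if_neg,
          if_false, ih, scanB]
        simp [wt]
    · simp only [PySem.Chars.split₀.go, hs, if_false, Bool.false_eq_true, ih, scanB]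
      rw [List.reverse_cons, wt_append]
      simp [wt, List.append_assoc]

theorem altStep_foldl (cs : List Char) : ∀ (k : Nat) (acc : List Char),
    (cs.foldl altStep (k, acc)).2 = acc ++ scanB k cs := by
  induction cs with
  | nil => simp [scanB]
  | cons c rest ih =>
    intro k acc
    by_cases hs : PySem.Chars.isspace c = true
    · simp [altStep, hs, ih, scanB]
    · simp [altStep, hs, ih, scanB]

theorem solution_toList (s : String) :
    (solution s).toList = scanB 0 s.toList := by
  show (PySem.Str.join "" ((PySem.Str.split₀ s).foldl (fun answer word => answer ++ [solutionWord word]) [])).toList = _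
  rw [foldl_append_singleton, List.nil_append, PySem.Str.toList_join]
  have : (List.map String.toList (List.map solutionWord (PySem.Str.split₀ s)))
      = List.map (wt 0) (PySem.Chars.split₀ s.toList) := by
    rw [PySem.Str.split₀]
    simp only [List.map_map]
    apply List.map_congr_left
    intro l _
    simp [Function.comp, solutionWord_eq]
  rw [this]
  have := go_flatten s.toList [] []
  simp only [PySem.Chars.split₀] at *
  simpa [join_nil_flatten, wt] using this

-- ===== VERDICT (by name: the statement is the Claim_ definition above) =====
theorem solution_spec : Claim_equal_solution := by
  intro s _
  show solution s = solution_alt s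
  have h1 := solution_toList s
  have h2 : (solution_alt s).toList = scanB 0 s.toList := by
    simp [solution_alt, altStep_foldl]
  apply String.toList_injective    -- if missing, use ext
  rw [h1, h2]
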